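-- pv_equiv track=rewrite | github.com/aaronchenweb/php-to-fastapi | analyzers/php_parser.py | _remove_class_bodies
-- ===== SOURCE A (Python) =====
-- def _remove_class_bodies(content: str) -> str:
--     """Remove class bodies from content to isolate standalone functions."""
--     result = []
--     in_class = 0
--     i = 0
--
--     while i < len(content):
--         if content[i:i+5] == 'class' and (i == 0 or not content[i-1].isalnum()):
--             # Found start of class
--             brace_pos = content.find('{', i)
--             if brace_pos != -1:
--                 result.append(content[i:brace_pos + 1])
--                 i = brace_pos + 1
--                 brace_count = 1
--
--                 # Skip class body
--                 while i < len(content) and brace_count > 0: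
--                     if content[i] == '{':
--                         brace_count += 1
--                     elif content[i] == '}':
--                         brace_count -= 1
--                     i += 1
--
--                 result.append('}')
--                 continue
--
--         result.append(content[i])
--         i += 1
--
--     return ''.join(result)
-- ===== SOURCE B (Python) =====
-- def _remove_class_bodies(content: str) -> str:
--     """Single-pass state machine: OUTSIDE copies text, IN_DECL copies a class
--     declaration up to its '{', IN_BODY skips the brace-balanced body."""
--     OUTSIDE, IN_DECL, IN_BODY = 0, 1, 2
--     out = []
--     state = OUTSIDE
--     depth = 0
--     for i, ch in enumerate(content):
--         if state == OUTSIDE: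
--             if content.startswith('class', i) and (i == 0 or not content[i - 1].isalnum()):
--                 state = IN_DECL
--             out.append(ch)
--         elif state == IN_DECL:
--             out.append(ch)
--             if ch == '{':
--                 state = IN_BODY
--                 depth = 1
--         else:  # IN_BODY
--             if ch == '{':
--                 depth += 1
--             elif ch == '}':
--                 depth -= 1
--                 if depth == 0:
--                     out.append('}')
--                     state = OUTSIDE
--     if state == IN_BODY:
--         out.append('}')
--     return ''.join(out)
-- ===== Notes on version B (the rewrite author's own statement) =====
-- stated objective: alternative
-- what changed: A's two-phase structure (detect 'class', then content.find('{'), then a separate inner brace-skipping loop with slicing) is replaced by one single-pass character-at-a-time state machine (OUTSIDE/IN_DECL/IN_BODY) with an explicit depth counter and no slicing or searching.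
import Mathlib
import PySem

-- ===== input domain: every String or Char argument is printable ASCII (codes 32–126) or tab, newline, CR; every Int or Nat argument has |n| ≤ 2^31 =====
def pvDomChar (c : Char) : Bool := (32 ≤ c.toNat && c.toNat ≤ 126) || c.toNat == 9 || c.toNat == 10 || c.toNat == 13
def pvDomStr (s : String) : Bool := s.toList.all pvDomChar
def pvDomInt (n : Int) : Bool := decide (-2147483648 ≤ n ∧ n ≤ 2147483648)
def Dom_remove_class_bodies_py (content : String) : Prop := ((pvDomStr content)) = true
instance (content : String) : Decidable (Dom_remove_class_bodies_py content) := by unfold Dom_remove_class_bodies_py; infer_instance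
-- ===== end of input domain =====

-- B replaces A's two-phase detect-then-find('{')-then-skip structure by one single-pass
-- character state machine (OUTSIDE / IN_DECL / IN_BODY with a depth counter); objective: alternative.

-- ===== PORT A =====
-- helper for A's inner `while i < len(content) and brace_count > 0` body-skipping loop:
-- returns the index i at which that loop stops.
def pvASkip (cs : List Char) (i : Nat) (bc : Int) : Nat :=
  if h : i < cs.length ∧ 0 < bc then
    pvASkip cs (i + 1)
      (if cs[i]! = '{' then bc + 1 else if cs[i]! = '}' then bc - 1 else bc)
  else i
termination_by cs.length - i
decreasing_by omega

-- pvASkip never moves backwards (cited by pvALoop's termination proof)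
theorem pvASkip_ge (cs : List Char) (i : Nat) (bc : Int) : i ≤ pvASkip cs i bc := by
  unfold pvASkip
  split
  · next h =>
    have := pvASkip_ge cs (i + 1)
      (if cs[i]! = '{' then bc + 1 else if cs[i]! = '}' then bc - 1 else bc)
    omega
  · omega
termination_by cs.length - i
decreasing_by omega

-- A's outer `while i < len(content)` loop
def pvALoop (cs : List Char) (i : Nat) (acc : List Char) : List Char :=
  if h : i < cs.length then
    if hc : PySem.List.slice cs (some (i : Int)) (some ((i + 5 : Nat) : Int)) = "class".toList
            ∧ (i = 0 ∨ PySem.Chars.isalnum (cs[i - 1]!) = false) then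
      -- brace_pos = content.find('{', i)
      if hne : PySem.Chars.findFrom cs ['{'] (i : Int) none ≠ -1 then
        pvALoop cs (pvASkip cs ((PySem.Chars.findFrom cs ['{'] (i : Int) none).toNat + 1) 1)
          (acc ++ PySem.List.slice cs (some (i : Int))
                    (some (PySem.Chars.findFrom cs ['{'] (i : Int) none + 1)) ++ ['}'])
      else
        pvALoop cs (i + 1) (acc ++ [cs[i]!])
    else
      pvALoop cs (i + 1) (acc ++ [cs[i]!])
  else acc
termination_by cs.length - i
decreasing_by
  · have hspec := PySem.Chars.findFrom_natCast_spec cs ['{'] i (le_of_lt h) hne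
    have h1 := hspec.1
    have h2 := pvASkip_ge cs ((PySem.Chars.findFrom cs ['{'] (i : Int) none).toNat + 1) 1
    omega
  · omega
  · omega

def remove_class_bodies_py (content : String) : String :=
  String.ofList (pvALoop content.toList 0 [])

-- ===== PORT B =====
-- B's boundary test `content.startswith('class', i) and (i == 0 or not content[i-1].isalnum())`,
-- on the remaining suffix cs = content[i:], with prev = content[i-1] (none at i = 0)
def pvBHit (cs : List Char) (prev : Option Char) : Bool :=
  PySem.Chars.startswith cs "class".toList
    && (match prev with | none => true | some p => ! PySem.Chars.isalnum p)

-- B's single `for i, ch in enumerate(content)` loop; `state`: 0 = OUTSIDE, 1 = IN_DECL, 2 = IN_BODY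
def pvBLoop (cs : List Char) (prev : Option Char) (state : Nat) (depth : Int)
    (acc : List Char) : List Char :=
  match cs with
  | [] => if state = 2 then acc ++ ['}'] else acc
  | ch :: rest =>
    if state = 0 then
      if pvBHit (ch :: rest) prev then
        pvBLoop rest (some ch) 1 depth (acc ++ [ch])
      else
        pvBLoop rest (some ch) 0 depth (acc ++ [ch])
    else if state = 1 then
      if ch = '{' then pvBLoop rest (some ch) 2 1 (acc ++ [ch])
      else pvBLoop rest (some ch) 1 depth (acc ++ [ch])
    else
      if ch = '{' then pvBLoop rest (some ch) 2 (depth + 1) acc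
      else if ch = '}' then
        if depth - 1 = 0 then pvBLoop rest (some ch) 0 (depth - 1) (acc ++ ['}'])
        else pvBLoop rest (some ch) 2 (depth - 1) acc
      else pvBLoop rest (some ch) 2 depth acc

def remove_class_bodies_py_alt (content : String) : String :=
  String.ofList (pvBLoop content.toList none 0 0 [])

-- ===== PRECONDITION & SPEC =====
def Spec_remove_class_bodies_py (content : String) (out : String) : Prop := out = remove_class_bodies_py_alt content
instance (content : String) (out : String) : Decidable (Spec_remove_class_bodies_py content out) := by unfold Spec_remove_class_bodies_py; infer_instance

-- ===== CLAIM (what is proved, stated in full; the proofs are below) =====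
def Claim_equal_remove_class_bodies_py : Prop := ∀ (content : String), Dom_remove_class_bodies_py content → Spec_remove_class_bodies_py content (remove_class_bodies_py content)

-- ===== LEMMAS AND PROOFS =====

-- content[i-1] as B's loop sees it when the suffix content[i:] remains
def pvPrevOf (cs : List Char) (i : Nat) : Option Char :=
  if i = 0 then none else some cs[i - 1]!

theorem pvASkip_le (cs : List Char) (i : Nat) (bc : Int) (h : i ≤ cs.length) :
    pvASkip cs i bc ≤ cs.length := by
  unfold pvASkip
  split
  · next hc =>
    exact pvASkip_le cs (i + 1)
      (if cs[i]! = '{' then bc + 1 else if cs[i]! = '}' then bc - 1 else bc) (by omega)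
  · omega
termination_by cs.length - i
decreasing_by omega

-- one-step unfoldings of pvBLoop, by state
theorem pvBLoop_nil (prev : Option Char) (state : Nat) (depth : Int) (acc : List Char) :
    pvBLoop [] prev state depth acc = if state = 2 then acc ++ ['}'] else acc := rfl

theorem pvBLoop_cons0 (ch : Char) (rest : List Char) (prev : Option Char) (d : Int)
    (acc : List Char) :
    pvBLoop (ch :: rest) prev 0 d acc =
      if pvBHit (ch :: rest) prev then pvBLoop rest (some ch) 1 d (acc ++ [ch])
      else pvBLoop rest (some ch) 0 d (acc ++ [ch]) := rfl

theorem pvBLoop_cons1 (ch : Char) (rest : List Char) (prev : Option Char) (d : Int)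
    (acc : List Char) :
    pvBLoop (ch :: rest) prev 1 d acc =
      if ch = '{' then pvBLoop rest (some ch) 2 1 (acc ++ [ch])
      else pvBLoop rest (some ch) 1 d (acc ++ [ch]) := rfl

theorem pvBLoop_cons2 (ch : Char) (rest : List Char) (prev : Option Char) (d : Int)
    (acc : List Char) :
    pvBLoop (ch :: rest) prev 2 d acc =
      if ch = '{' then pvBLoop rest (some ch) 2 (d + 1) acc
      else if ch = '}' then
        if d - 1 = 0 then pvBLoop rest (some ch) 0 (d - 1) (acc ++ ['}'])
        else pvBLoop rest (some ch) 2 (d - 1) acc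
      else pvBLoop rest (some ch) 2 d acc := rfl

-- A with no '{' at or after position i copies the rest verbatim
theorem pvALoop_no_brace (cs : List Char) (i : Nat) (acc : List Char)
    (hnb : '{' ∉ cs.drop i) : pvALoop cs i acc = acc ++ cs.drop i := by
  rw [pvALoop]
  split
  · next h =>
    have hdrop := List.drop_eq_getElem_cons h
    have hbang : cs[i]! = cs[i] := getElem!_pos cs i h
    have hne : PySem.Chars.findFrom cs ['{'] (i : Int) none = -1 := by
      rw [PySem.Chars.findFrom_natCast_eq_neg_one_iff cs ['{'] i h.le]
      exact fun hinf => hnb (hinf.subset (by simp))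
    have htail : '{' ∉ cs.drop (i + 1) := by
      rw [hdrop] at hnb; simp only [List.mem_cons, not_or] at hnb; exact hnb.2
    have hrec := pvALoop_no_brace cs (i + 1) (acc ++ [cs[i]!]) htail
    split
    · next hc =>
      rw [dif_neg (by simp [hne])]
      rw [hrec, hdrop, hbang]; simp
    · rw [hrec, hdrop, hbang]; simp
  · next h =>
    rw [List.drop_eq_nil_of_le (by omega)]; simp
termination_by cs.length - i
decreasing_by all_goals omega

-- B in IN_DECL with no '{' left copies the rest verbatim
theorem pvBLoop_decl_no_brace (u : List Char) (p : Option Char) (d : Int) (acc : List Char)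
    (hnb : '{' ∉ u) : pvBLoop u p 1 d acc = acc ++ u := by
  induction u generalizing p acc with
  | nil => simp [pvBLoop_nil]
  | cons ch rest ih =>
    simp only [List.mem_cons, not_or] at hnb
    rw [pvBLoop_cons1, if_neg (fun hh : ch = '{' => hnb.1 hh.symm),
        ih (some ch) (acc ++ [ch]) hnb.2]
    simp

-- B in IN_DECL copies up to and including the first '{', then enters IN_BODY at depth 1
theorem pvBLoop_decl (u v : List Char) (p : Option Char) (d : Int) (acc : List Char)
    (hnb : '{' ∉ u) :
    pvBLoop (u ++ '{' :: v) p 1 d acc = pvBLoop v (some '{') 2 1 (acc ++ (u ++ ['{'])) := by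
  induction u generalizing p acc with
  | nil => rw [List.nil_append, pvBLoop_cons1, if_pos rfl]; simp
  | cons ch rest ih =>
    simp only [List.mem_cons, not_or] at hnb
    rw [List.cons_append, pvBLoop_cons1, if_neg (fun hh : ch = '{' => hnb.1 hh.symm),
        ih (some ch) (acc ++ [ch]) hnb.2]
    simp

-- B in IN_BODY behaves like A's skip loop followed by the literal '}'
theorem pvBLoop_body (cs : List Char) (m : Nat) (bc : Int) (p : Option Char)
    (acc : List Char) (hm : m ≤ cs.length) (hbc : 0 < bc) :
    pvBLoop (cs.drop m) p 2 bc acc =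
      pvBLoop (cs.drop (pvASkip cs m bc)) (pvPrevOf cs (pvASkip cs m bc)) 0 0 (acc ++ ['}']) := by
  by_cases h : m < cs.length
  · have hdrop := List.drop_eq_getElem_cons h
    have hbang : cs[m]! = cs[m] := getElem!_pos cs m h
    rw [pvASkip, dif_pos ⟨h, hbc⟩, hbang]
    rw [hdrop, pvBLoop_cons2]
    by_cases h1 : cs[m] = '{'
    · rw [if_pos h1, if_pos h1]
      exact pvBLoop_body cs (m + 1) (bc + 1) (some cs[m]) acc (by omega) (by omega)
    · rw [if_neg h1, if_neg h1]
      by_cases h2 : cs[m] = '}'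
      · rw [if_pos h2, if_pos h2]
        by_cases h3 : bc - 1 = 0
        · rw [if_pos h3, h3]
          rw [show pvASkip cs (m + 1) 0 = m + 1 from by rw [pvASkip]; simp]
          have : pvPrevOf cs (m + 1) = some cs[m] := by
            simp [pvPrevOf, getElem!_pos cs m h]
          rw [this, h2]
        · rw [if_neg h3]
          exact pvBLoop_body cs (m + 1) (bc - 1) (some cs[m]) acc (by omega) (by omega)
      · rw [if_neg h2, if_neg h2]
        exact pvBLoop_body cs (m + 1) bc (some cs[m]) acc (by omega) hbc
  · have hm' : m = cs.length := by omega
    rw [pvASkip, dif_neg (by omega)]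
    rw [List.drop_eq_nil_of_le (by omega), pvBLoop_nil, pvBLoop_nil]
    simp
termination_by cs.length - m
decreasing_by all_goals omega

-- the two versions test for a class declaration start in the same way
theorem pvCond_bridge (cs : List Char) (i : Nat) (h : i < cs.length) :
    pvBHit (cs[i] :: cs.drop (i + 1)) (pvPrevOf cs i) = true ↔
      (PySem.List.slice cs (some (i : Int)) (some ((i + 5 : Nat) : Int)) = "class".toList
        ∧ (i = 0 ∨ PySem.Chars.isalnum (cs[i - 1]!) = false)) := by
  have hdrop := List.drop_eq_getElem_cons h
  rw [pvBHit.eq_def, Bool.and_eq_true]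
  apply and_congr
  · rw [PySem.Chars.startswith_iff, ← hdrop, PySem.List.slice_natCast cs i (i + 5)]
    rw [show i + 5 - i = 5 from by omega, List.prefix_iff_eq_take]
    rw [show ("class".toList).length = 5 from rfl]
    exact ⟨fun h => h.symm, fun h => h.symm⟩
  · by_cases hi0 : i = 0 <;> simp [pvPrevOf, hi0]

theorem pvMain (cs : List Char) (i : Nat) (acc : List Char) (hi : i ≤ cs.length) :
    pvALoop cs i acc = pvBLoop (cs.drop i) (pvPrevOf cs i) 0 0 acc := by
  rw [pvALoop]
  split
  · next h =>
    have hdrop := List.drop_eq_getElem_cons h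
    have hbang : cs[i]! = cs[i] := getElem!_pos cs i h
    have hbridge := pvCond_bridge cs i h
    split
    · next hc =>
      have hBc : pvBHit (cs[i] :: cs.drop (i + 1)) (pvPrevOf cs i) = true := hbridge.mpr hc
      by_cases hne : PySem.Chars.findFrom cs ['{'] (i : Int) none = -1
      · -- no '{' anywhere at or after i: A copies the rest char by char,
        -- B's IN_DECL copies the rest too
        rw [dif_neg (by simp [hne])]
        have hnb : '{' ∉ cs.drop i := by
          have hno := (PySem.Chars.findFrom_natCast_eq_neg_one_iff cs ['{'] i h.le).mp hne
          intro hm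
          obtain ⟨s, t, hst⟩ := List.append_of_mem hm
          exact hno ⟨s, t, by simp [hst]⟩
        have htail : '{' ∉ cs.drop (i + 1) := by
          rw [hdrop] at hnb; simp only [List.mem_cons, not_or] at hnb; exact hnb.2
        rw [pvALoop_no_brace cs (i + 1) _ htail]
        rw [hdrop, pvBLoop_cons0, if_pos hBc,
            pvBLoop_decl_no_brace (cs.drop (i + 1)) (some cs[i]) 0 (acc ++ [cs[i]]) htail]
        simp [hbang]
      · -- '{' found at index j: A copies content[i:j+1], skips to k, appends '}';
        -- B walks IN_DECL to the '{' and IN_BODY to the same k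
        rw [dif_pos hne]
        obtain ⟨hj1, hj2, hj3⟩ := PySem.Chars.findFrom_natCast_spec cs ['{'] i h.le hne
        have hj0 : (0 : Int) ≤ PySem.Chars.findFrom cs ['{'] (i : Int) none := by
          have : (0 : Int) ≤ (i : Int) := by positivity
          omega
        obtain ⟨j, hjeq⟩ : ∃ j : Nat,
            PySem.Chars.findFrom cs ['{'] (i : Int) none = (j : Int) :=
          ⟨_, (Int.toNat_of_nonneg hj0).symm⟩
        rw [hjeq] at hj1 hj2 hj3 ⊢
        simp only [Int.toNat_natCast] at hj2 hj3 ⊢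
        have hij' : i ≤ j := by exact_mod_cast hj1
        have hjlen : j < cs.length := by
          by_contra hge
          rw [List.drop_eq_nil_of_le (by omega)] at hj2
          simp at hj2
        have hcj : cs[j] = '{' := by
          rw [List.drop_eq_getElem_cons hjlen, List.cons_prefix_cons] at hj2
          exact hj2.1.symm
        have hci : cs[i] = 'c' := by
          have h5 := hc.1
          rw [PySem.List.slice_natCast cs i (i + 5), show i + 5 - i = 5 from by omega,
              hdrop] at h5
          rw [show ("class".toList) = 'c' :: ['l','a','s','s'] from rfl] at h5
          rw [List.take_succ_cons] at h5
          exact (List.cons.injEq _ _ _ _ ▸ h5).1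
        have hij : i < j := by
          rcases Nat.lt_or_ge i j with h' | h'
          · exact h'
          · exfalso
            have he : i = j := by omega
            have h1 : cs[i]? = some 'c' := by rw [List.getElem?_eq_getElem h, hci]
            have h2 : cs[j]? = some '{' := by rw [List.getElem?_eq_getElem hjlen, hcj]
            rw [he, h2] at h1
            exact absurd h1 (by simp)
        have hlenu : ((cs.drop (i + 1)).take (j - (i + 1))).length = j - (i + 1) := by
          rw [List.length_take, List.length_drop]; omega
        have hdecomp : cs.drop (i + 1) =
            (cs.drop (i + 1)).take (j - (i + 1)) ++ '{' :: cs.drop (j + 1) := by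
          conv_lhs => rw [← List.take_append_drop (j - (i + 1)) (cs.drop (i + 1))]
          rw [List.drop_drop, show i + 1 + (j - (i + 1)) = j from by omega,
              List.drop_eq_getElem_cons hjlen, hcj]
        have hnbu : '{' ∉ (cs.drop (i + 1)).take (j - (i + 1)) := by
          intro hm
          obtain ⟨k, hk, huk⟩ := List.mem_iff_getElem.mp hm
          have hk' : k < j - (i + 1) := by rw [hlenu] at hk; exact hk
          rw [List.getElem_take, List.getElem_drop] at huk
          apply hj3 (i + 1 + k) (by omega) (by omega)
          rw [List.drop_eq_getElem_cons (show i + 1 + k < cs.length from by omega), huk,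
              List.cons_prefix_cons]
          exact ⟨rfl, List.nil_prefix⟩
        have hslice : PySem.List.slice cs (some (i : Int)) (some ((j : Int) + 1))
            = cs[i] :: ((cs.drop (i + 1)).take (j - (i + 1)) ++ ['{']) := by
          rw [show (j : Int) + 1 = ((j + 1 : Nat) : Int) from by push_cast; ring,
              PySem.List.slice_natCast cs i (j + 1)]
          rw [hdrop, show j + 1 - i = (j - (i + 1) + 1) + 1 from by omega,
              List.take_succ_cons]
          congr 1
          conv_lhs => rw [hdecomp]
          rw [List.take_append, hlenu,
              List.take_of_length_le (by rw [hlenu]; omega :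
                ((cs.drop (i + 1)).take (j - (i + 1))).length ≤ j - (i + 1) + 1),
              show j - (i + 1) + 1 - (j - (i + 1)) = 1 from by omega]
          simp
        have hk1 : j + 1 ≤ cs.length := by omega
        have hskle := pvASkip_le cs (j + 1) 1 hk1
        have hskge := pvASkip_ge cs (j + 1) 1
        rw [pvMain cs (pvASkip cs (j + 1) 1) _ hskle]
        rw [hdrop, pvBLoop_cons0, if_pos hBc]
        conv_rhs => rw [hdecomp]
        rw [pvBLoop_decl ((cs.drop (i + 1)).take (j - (i + 1))) (cs.drop (j + 1))
              (some cs[i]) 0 (acc ++ [cs[i]]) hnbu,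
            pvBLoop_body cs (j + 1) 1 (some '{') _ hk1 (by omega)]
        rw [hslice]
        simp
    · next hc =>
      have hBc : pvBHit (cs[i] :: cs.drop (i + 1)) (pvPrevOf cs i) = false := by
        rw [← Bool.not_eq_true]
        exact fun ht => hc (hbridge.mp ht)
      rw [pvMain cs (i + 1) _ (by omega)]
      rw [hdrop, pvBLoop_cons0]
      rw [if_neg (show ¬ (pvBHit (cs[i] :: cs.drop (i + 1)) (pvPrevOf cs i) = true) from
            by rw [hBc]; exact Bool.false_ne_true)]
      have hprev : pvPrevOf cs (i + 1) = some cs[i]! := by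
        simp [pvPrevOf, hbang]
      rw [hprev, hbang]
  · next h =>
    rw [List.drop_eq_nil_of_le (by omega), pvBLoop_nil]
    simp
termination_by cs.length - i
decreasing_by all_goals omega

-- ===== VERDICT (by name: the statement is the Claim_ definition above) =====
theorem remove_class_bodies_py_spec : Claim_equal_remove_class_bodies_py := by
  intro content _
  unfold Spec_remove_class_bodies_py remove_class_bodies_py remove_class_bodies_py_alt
  rw [pvMain content.toList 0 [] (by omega)]
  rfl
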